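-- pv_equiv track=rewrite | github.com/hyowonsong/Algorithm1 | 프로그래머스/1/133502. 햄버거 만들기/햄버거 만들기.py | solution
-- ===== SOURCE A (Python) =====
-- def solution(ingredient):
--     stack = []
--     count = 0
--
--     for item in ingredient:
--         stack.append(item)
--
--         # 스택의 길이가 4 이상이고, 마지막 4개 요소가 [1, 2, 3, 1]인 경우
--         if len(stack) >= 4 and stack[-4:] == [1, 2, 3, 1]:
--             # 햄버거 완성, 카운트 증가
--             count += 1
--             # 사용된 재료 제거 (pop 4번)
--             for _ in range(4):
--                 stack.pop()
--
--     return count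
-- ===== SOURCE B (Python) =====
-- def _reduce_once(lst):
--     # first index i with lst[i:i+4] == [1,2,3,1]; return lst with that slice deleted, or None
--     for i in range(len(lst) - 3):
--         if lst[i:i + 4] == [1, 2, 3, 1]:
--             return lst[:i] + lst[i + 4:]
--     return None
--
--
-- def solution(ingredient):
--     cur = list(ingredient)
--     count = 0
--     while True:
--         nxt = _reduce_once(cur)
--         if nxt is None:
--             return count
--         cur = nxt
--         count += 1
-- ===== Notes on version B (the rewrite author's own statement) =====
-- stated objective: alternative
-- what changed: Replaces the single left-to-right stack pass (push each item, pop 4 on a [1,2,3,1] suffix) by repeated full scans that delete the leftmost [1,2,3,1] occurrence from a copy of the list until none remains; equal because counting 1231-reductions is independent of removal order.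
import Mathlib
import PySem

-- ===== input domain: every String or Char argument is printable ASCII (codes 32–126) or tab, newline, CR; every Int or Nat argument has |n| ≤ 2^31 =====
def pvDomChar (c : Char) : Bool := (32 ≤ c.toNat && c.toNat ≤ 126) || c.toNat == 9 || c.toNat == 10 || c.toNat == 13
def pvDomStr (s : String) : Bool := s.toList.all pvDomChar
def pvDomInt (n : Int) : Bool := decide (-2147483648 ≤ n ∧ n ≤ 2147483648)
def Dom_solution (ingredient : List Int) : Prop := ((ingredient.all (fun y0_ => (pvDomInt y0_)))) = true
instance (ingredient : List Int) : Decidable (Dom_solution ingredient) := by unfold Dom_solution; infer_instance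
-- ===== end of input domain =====

-- B replaces A's single stack pass by repeatedly deleting the leftmost [1,2,3,1] occurrence
-- from a copy of the list (alternative algorithm, not faster; the argument list is not mutated).


-- ===== PORT A =====
-- the for-loop over `ingredient` with state (stack, count); stack[-4:] is ported via
-- PySem.List.slice, the four .pop() calls as four dropLast
def solutionAux : List Int → List Int → Int → Int
  | _, [], count => count
  | stack, item :: rest, count =>
      let s' := stack ++ [item]
      if 4 ≤ s'.length ∧ PySem.List.slice s' (some (-4)) none = ([1, 2, 3, 1] : List Int) then
        solutionAux s'.dropLast.dropLast.dropLast.dropLast rest (count + 1)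
      else
        solutionAux s' rest count

def solution (ingredient : List Int) : Int := solutionAux [] ingredient 0

-- ===== PORT B =====
-- _reduce_once: scan left to right for the first i with lst[i:i+4] == [1,2,3,1];
-- delete that slice (lst[:i] + lst[i+4:], built here by consing the skipped prefix), else None
def findDel : List Int → Option (List Int)
  | [] => none
  | x :: xs =>
      if (x :: xs).take 4 = ([1, 2, 3, 1] : List Int) then some ((x :: xs).drop 4)
      else (findDel xs).map (fun l => x :: l)

theorem findDel_length : ∀ {l l' : List Int}, findDel l = some l' → l'.length < l.length := by
  intro l
  induction l with
  | nil => intro l' h; simp [findDel] at h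
  | cons x xs ih =>
      intro l' h
      simp only [findDel] at h
      split at h
      · next hc =>
          have h4 : 3 ≤ xs.length := by
            have hl := congrArg List.length hc
            rw [List.length_take] at hl
            simp at hl
            omega
          simp only [Option.some.injEq] at h
          subst h
          simp only [List.length_drop, List.length_cons]
          omega
      · simp only [Option.map_eq_some_iff] at h
        obtain ⟨a, ha, rfl⟩ := h
        have := ih ha
        simp
        omega

-- the while-loop of B: reduce once, count, until no occurrence remains
def bLoop (l : List Int) (count : Int) : Int :=
  match h : findDel l with
  | none => count
  | some l' => bLoop l' (count + 1)
termination_by l.length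
decreasing_by exact findDel_length h

def solution_alt (ingredient : List Int) : Int := bLoop ingredient 0

-- ===== PRECONDITION & SPEC =====
def Spec_solution (ingredient : List Int) (out : Int) : Prop := out = solution_alt ingredient
instance (ingredient : List Int) (out : Int) : Decidable (Spec_solution ingredient out) := by unfold Spec_solution; infer_instance

-- ===== CLAIM (what is proved, stated in full; the proofs are below) =====
def Claim_equal_solution : Prop := ∀ (ingredient : List Int), Dom_solution ingredient → Spec_solution ingredient (solution ingredient)

-- ===== LEMMAS AND PROOFS =====

-- "l contains no occurrence of the pattern"
def NoOcc (l : List Int) : Prop := ¬ ([1, 2, 3, 1] : List Int) <:+: l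

theorem noOcc_of_infix {l₁ l₂ : List Int} (h : l₁ <:+: l₂) (h₂ : NoOcc l₂) : NoOcc l₁ :=
  fun hp => h₂ (hp.trans h)

theorem bLoop_none {l : List Int} {c : Int} (h : findDel l = none) : bLoop l c = c := by
  rw [bLoop]
  split
  · rfl
  · rename_i l' heq
    rw [h] at heq
    simp at heq

theorem bLoop_some {l l' : List Int} {c : Int} (h : findDel l = some l') :
    bLoop l c = bLoop l' (c + 1) := by
  rw [bLoop]
  split
  · rename_i heq
    rw [h] at heq
    simp at heq
  · rename_i l'' heq
    rw [h] at heq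
    injection heq with heq'
    rw [heq']

theorem findDel_none_of_noOcc : ∀ {l : List Int}, NoOcc l → findDel l = none := by
  intro l
  induction l with
  | nil => intro _; simp [findDel]
  | cons x xs ih =>
      intro h
      simp only [findDel]
      rw [if_neg, ih, Option.map_none]
      · exact noOcc_of_infix ⟨[x], [], by simp⟩ h
      · intro hc
        have hsp : (x :: xs) = [1, 2, 3, 1] ++ (x :: xs).drop 4 := by
          rw [← hc]; exact ((x :: xs).take_append_drop 4).symm
        exact h ⟨[], (x :: xs).drop 4, by rw [List.nil_append]; exact hsp.symm⟩

theorem findDel_first : ∀ {u : List Int} (v : List Int), NoOcc (u ++ [1, 2, 3]) →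
    findDel (u ++ ([1, 2, 3, 1] ++ v)) = some (u ++ v) := by
  intro u
  induction u with
  | nil => intro v _; simp [findDel]
  | cons x u ih =>
      intro v h
      simp only [List.cons_append, findDel]
      rw [if_neg, show u ++ 1 :: 2 :: 3 :: 1 :: ([] ++ v) = u ++ ([1, 2, 3, 1] ++ v) from by simp,
        ih v (noOcc_of_infix ⟨[x], [], by simp⟩ h), Option.map_some]
      intro hc
      apply h
      simp only [List.nil_append] at hc
      have hL : ([1, 2, 3, 1] : List Int) <+: x :: (u ++ (1 :: 2 :: 3 :: 1 :: v)) :=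
        hc ▸ List.take_prefix 4 (x :: (u ++ (1 :: 2 :: 3 :: 1 :: v)))
      have htake : (x :: (u ++ (1 :: 2 :: 3 :: 1 :: v))).take (u.length + 4) =
          x :: (u ++ [1, 2, 3]) := by
        rw [show u.length + 4 = (u.length + 3) + 1 from rfl, List.take_succ_cons,
          List.take_append]
        simp
      have hp2 : ([1, 2, 3, 1] : List Int) <+: x :: (u ++ [1, 2, 3]) := by
        rw [← htake]
        exact List.prefix_take_iff.mpr ⟨hL, by simp⟩
      obtain ⟨t, ht⟩ := hp2
      exact ⟨[], t, by rw [List.nil_append]; exact ht⟩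

-- an occurrence in l ++ [x] is an occurrence in l, or a suffix of l ++ [x]
theorem occ_snoc {l : List Int} {x : Int}
    (h : ([1, 2, 3, 1] : List Int) <:+: l ++ [x]) :
    ([1, 2, 3, 1] : List Int) <:+: l ∨ ([1, 2, 3, 1] : List Int) <:+ l ++ [x] := by
  obtain ⟨s, t, hst⟩ := h
  rcases t.eq_nil_or_concat with rfl | ⟨w, a, rfl⟩
  · right; exact ⟨s, by simpa using hst⟩
  · left
    have : (s ++ [1, 2, 3, 1] ++ w) ++ [a] = l ++ [x] := by
      simpa [List.append_assoc] using hst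
    obtain ⟨h1, -⟩ := List.append_inj' this (by simp)
    exact ⟨s, w, h1⟩

-- the main invariant: running A's loop from a pattern-free stack computes B's loop
theorem main_inv : ∀ (rest stack : List Int) (c : Int), NoOcc stack →
    solutionAux stack rest c = bLoop (stack ++ rest) c := by
  intro rest
  induction rest with
  | nil =>
      intro stack c h
      simp only [solutionAux, List.append_nil]
      rw [bLoop_none (findDel_none_of_noOcc h)]
  | cons x rest ih =>
      intro stack c h
      simp only [solutionAux]
      split
      · next hc =>
          obtain ⟨hlen, hsl⟩ := hc
          rw [PySem.List.slice_from_neg_ofNat _ 4 (by omega)] at hsl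
          obtain ⟨t, hsplit⟩ : ∃ t, stack ++ [x] = t ++ ([1, 2, 3, 1] : List Int) :=
            ⟨(stack ++ [x]).take ((stack ++ [x]).length - 4), by
              conv_lhs => rw [← List.take_append_drop ((stack ++ [x]).length - 4) (stack ++ [x])]
              rw [hsl]⟩
          have heq : (t ++ [1, 2, 3]) ++ [(1 : Int)] = stack ++ [x] := by
            rw [hsplit]; simp
          have hstack : stack = t ++ [1, 2, 3] := (List.append_inj' heq (by simp)).1.symm
          have hx : x = 1 := by
            have h2 := (List.append_inj' heq (by simp)).2
            injection h2 with h2'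
            exact h2'.symm
          have hdrop : (stack ++ [x]).dropLast.dropLast.dropLast.dropLast = t := by
            rw [hsplit,
              show t ++ ([1, 2, 3, 1] : List Int) = ((((t ++ [1]) ++ [2]) ++ [3]) ++ [1]) from by
                simp,
              List.dropLast_concat, List.dropLast_concat, List.dropLast_concat,
              List.dropLast_concat]
          have hnot : NoOcc t :=
            noOcc_of_infix ⟨[], [1, 2, 3], by rw [List.nil_append]; exact hstack.symm⟩ h
          rw [hdrop, ih t (c + 1) hnot,
            bLoop_some (l := stack ++ x :: rest) (l' := t ++ rest) ?_]
          · rw [show stack ++ x :: rest = t ++ ([1, 2, 3, 1] ++ rest) from by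
              rw [hstack, hx]; simp]
            exact findDel_first rest (hstack ▸ h)
      · next hc =>
          have hno : NoOcc (stack ++ [x]) := by
            intro hocc
            rcases occ_snoc hocc with hin | hsuf
            · exact h hin
            · apply hc
              have hlen : 4 ≤ (stack ++ [x]).length := by
                have := hsuf.length_le; simpa using this
              refine ⟨hlen, ?_⟩
              rw [PySem.List.slice_from_neg_ofNat _ 4 (by omega)]
              obtain ⟨s, hs⟩ := hsuf
              rw [← hs]
              have : s.length = (s ++ [1, 2, 3, 1]).length - 4 := by simp
              rw [← this, List.drop_left]
          rw [ih (stack ++ [x]) c hno, List.append_assoc]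
          rfl

theorem noOcc_nil : NoOcc [] := by
  intro ⟨s, t, h⟩
  simp [List.append_eq_nil_iff] at h

-- ===== VERDICT (by name: the statement is the Claim_ definition above) =====
theorem solution_spec : Claim_equal_solution := by
  intro ingredient _
  unfold Spec_solution solution solution_alt
  simpa using main_inv ingredient [] 0 noOcc_nil
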